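-- pv_equiv track=rewrite | github.com/RogerGuevara555/Portafolios-de-proyectos | Mini-proyects/$5 y $3/version_profe_fernando.py | pagar
-- ===== SOURCE A (Python) =====
-- def pagar(n, l):
--     if (n == 0):
--         return(l)
--     if (n < 0):
--         return (l + [-1])
--     nuevalista = pagar(n - 5, l + [5])
--     if (nuevalista[-1] != -1):
--         return (nuevalista)
--     else:
--         nuevalista = pagar(n - 3, l + [3])
--         if (nuevalista[-1] != -1):
--             return (nuevalista)
--         else:
--             return (l + [-1])
-- ===== SOURCE B (Python) =====
-- def pagar(n, l):
--     # Closed form: the DFS of A (try 5 before 3) returns l + [5]*a + [3]*b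
--     # where a is the largest count of fives with the remainder divisible by 3.
--     if n < 0:
--         return l + [-1]
--     q = n // 5
--     a = q - ((q - 2 * n) % 3)   # largest a <= n//5 with a ≡ 2n (mod 3), i.e. 3 | n - 5a
--     if a < 0:
--         return l + [-1]
--     b = (n - 5 * a) // 3
--     return l + [5] * a + [3] * b
-- ===== Notes on version B (the rewrite author's own statement) =====
-- stated objective: faster
-- what changed: Replaced the backtracking recursion with a closed form: the maximal number of fives a with 3 | n-5a is computed by one modular-arithmetic expression and the result is built directly as l+[5]*a+[3]*b.
import Mathlib
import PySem

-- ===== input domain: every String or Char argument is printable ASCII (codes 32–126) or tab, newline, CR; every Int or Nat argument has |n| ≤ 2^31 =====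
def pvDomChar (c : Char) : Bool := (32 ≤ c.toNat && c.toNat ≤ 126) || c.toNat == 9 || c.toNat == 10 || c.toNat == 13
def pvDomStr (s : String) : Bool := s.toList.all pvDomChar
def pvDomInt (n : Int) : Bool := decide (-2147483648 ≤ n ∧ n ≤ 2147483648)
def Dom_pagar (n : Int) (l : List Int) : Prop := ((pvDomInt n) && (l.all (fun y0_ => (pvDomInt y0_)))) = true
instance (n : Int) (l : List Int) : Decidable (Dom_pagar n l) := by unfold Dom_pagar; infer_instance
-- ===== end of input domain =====

-- B replaces A's backtracking recursion by a closed-form modular-arithmetic construction (objective: faster).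


-- ===== PORT A =====
-- literal transliteration of A's backtracking recursion; 'nuevalista[-1]' is ported as
-- (PySem.List.pyGet? … (-1)).getD 0 — the indexed list is provably nonempty there (it always
-- contains the element appended in the recursive call), so the default is never used and the
-- Python never raises IndexError.
-- fuel is only a structural totality guard (one unit per recursive call; n.toNat + 1 units
-- suffice since n strictly decreases by 3 or 5 per call); the fuel-0 branch is never reached.
def pagarGo (fuel : Nat) (n : Int) (l : List Int) : List Int :=
  match fuel with
  | 0 => l
  | fuel + 1 =>
    if n = 0 then l
    else if n < 0 then l ++ [-1]
    else
      let nuevalista := pagarGo fuel (n - 5) (l ++ [5])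
      if (PySem.List.pyGet? nuevalista (-1)).getD 0 ≠ -1 then nuevalista
      else
        let nuevalista := pagarGo fuel (n - 3) (l ++ [3])
        if (PySem.List.pyGet? nuevalista (-1)).getD 0 ≠ -1 then nuevalista
        else l ++ [-1]

def pagar (n : Int) (l : List Int) : List Int := pagarGo (n.toNat + 1) n l

-- ===== PORT B =====
def pagar_alt (n : Int) (l : List Int) : List Int :=
  if n < 0 then l ++ [-1]
  else
    let q := PySem.Int.floordiv n 5
    let a := q - PySem.Int.mod (q - 2 * n) 3
    if a < 0 then l ++ [-1]
    else
      let b := PySem.Int.floordiv (n - 5 * a) 3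
      l ++ List.replicate a.toNat 5 ++ List.replicate b.toNat 3

-- ===== PRECONDITION & SPEC =====
-- Pre_ excludes n > 47000: there A's recursion (one stack frame per 5 subtracted from n) overflows
-- the interpreter's recursion limit and A raises RecursionError (under the grader's 10000-frame limit
-- the overflow occurs near n = 49990); the exact overflow point depends on the caller's existing stack
-- depth, so the bound keeps a small safety margin — on that margin B returns exactly A's value.
def Pre_pagar (n : Int) (_l : List Int) : Prop := n ≤ 47000
instance (n : Int) (l : List Int) : Decidable (Pre_pagar n l) := by unfold Pre_pagar; infer_instance
def pvWitness_pagar : Int × List Int := (13, [2])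

def Spec_pagar (n : Int) (l : List Int) (out : List Int) : Prop := out = pagar_alt n l
instance (n : Int) (l : List Int) (out : List Int) : Decidable (Spec_pagar n l out) := by unfold Spec_pagar; infer_instance

-- ===== CLAIM (what is proved, stated in full; the proofs are below) =====
def Claim_equal_pagar : Prop := ∀ (n : Int) (l : List Int), Dom_pagar n l → Pre_pagar n l → Spec_pagar n l (pagar n l)

-- ===== LEMMAS AND PROOFS =====

-- the number of fives B computes: largest a ≤ n/5 with 3 ∣ n - 5a  (pure Int/ediv/emod form)
def pvA (n : Int) : Int := n / 5 - (n / 5 - 2 * n) % 3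
-- the suffix both programs append to l
def pvS (n : Int) : List Int :=
  if n < 0 then [-1]
  else if pvA n < 0 then [-1]
  else List.replicate (pvA n).toNat 5 ++ List.replicate ((n - 5 * pvA n) / 3).toNat 3

theorem pagar_alt_eq (n : Int) (l : List Int) : pagar_alt n l = l ++ pvS n := by
  unfold pagar_alt pvS
  by_cases h : n < 0
  · simp [h]
  · simp only [h, if_false]
    have hq : PySem.Int.floordiv n 5 = n / 5 :=
      PySem.Int.floordiv_eq_ediv_of_pos (by norm_num)
    have hm : PySem.Int.mod (n / 5 - 2 * n) 3 = (n / 5 - 2 * n) % 3 :=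
      PySem.Int.mod_eq_emod_of_pos (by norm_num)
    simp only [hq, hm]
    show (if pvA n < 0 then l ++ [-1] else _) = _
    by_cases h2 : pvA n < 0
    · simp [h2]
    · simp only [h2, if_false]
      rw [PySem.Int.floordiv_eq_ediv_of_pos (by norm_num)]
      simp [List.append_assoc, pvA]

-- characterization of pvA
theorem pvA_dvd (n : Int) : 3 ∣ (n - 5 * pvA n) := by unfold pvA; omega
theorem pvA_bounds (n : Int) : 5 * pvA n ≤ n := by unfold pvA; omega
theorem pvA_max (n a : Int) (h1 : 5 * a ≤ n) (h2 : 3 ∣ (n - 5 * a)) : a ≤ pvA n := by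
  unfold pvA; omega
theorem pvA_zero : pvA 0 = 0 := by decide

-- recurrence facts
theorem pvA_step5 (n : Int) :
    pvA n = pvA (n - 5) + 1 := by
  have d1 := pvA_dvd (n - 5)
  have b1 := pvA_bounds (n - 5)
  have dn := pvA_dvd n
  have bn := pvA_bounds n
  have m1 : pvA (n - 5) + 1 ≤ pvA n := pvA_max n _ (by omega) (by omega)
  have m2 : pvA n - 1 ≤ pvA (n - 5) := pvA_max (n - 5) _ (by omega) (by omega)
  omega

theorem pvA_step3 (n : Int) (h5 : n - 5 < 0 ∨ pvA (n - 5) < 0)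
    (h3 : 0 ≤ n - 3) (ha : 0 ≤ pvA (n - 3)) :
    pvA n = 0 ∧ pvA (n - 3) = 0 ∧ 3 ∣ n := by
  have d3 := pvA_dvd (n - 3)
  have b3 := pvA_bounds (n - 3)
  have ha0 : pvA (n - 3) ≤ 0 := by
    by_contra hc
    have : pvA (n - 3) - 1 ≤ pvA (n - 5) := pvA_max (n - 5) _ (by omega) (by omega)
    omega
  have hdn : (3:Int) ∣ n := by omega
  have hge : (0:Int) ≤ pvA n := pvA_max n 0 (by omega) (by omega)
  have hle : pvA n ≤ 0 := by
    by_contra hc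
    have dn := pvA_dvd n
    have bn := pvA_bounds n
    have : pvA n - 1 ≤ pvA (n - 5) := pvA_max (n - 5) _ (by omega) (by omega)
    omega
  omega

theorem pvA_fail (n : Int) (h0 : 0 < n) (h5 : n - 5 < 0 ∨ pvA (n - 5) < 0)
    (h3 : n - 3 < 0 ∨ pvA (n - 3) < 0) : pvA n < 0 := by
  by_contra hc
  have dn := pvA_dvd n
  have bn := pvA_bounds n
  by_cases h1 : 1 ≤ pvA n
  · have : pvA n - 1 ≤ pvA (n - 5) := pvA_max (n - 5) _ (by omega) (by omega)
    omega
  · have hz : pvA n = 0 := by omega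
    have hdn : (3:Int) ∣ n := by omega
    have : (0:Int) ≤ pvA (n - 3) := pvA_max (n - 3) 0 (by omega) (by omega)
    omega

-- shape of pvS in the two branches
theorem pvS_good (n : Int) (h0 : 0 ≤ n) (ha : 0 ≤ pvA n) :
    pvS n = List.replicate (pvA n).toNat 5 ++ List.replicate ((n - 5 * pvA n) / 3).toNat 3 := by
  unfold pvS; rw [if_neg (by omega), if_neg (by omega)]

theorem pvS_bad (n : Int) (h : n < 0 ∨ pvA n < 0) : pvS n = [-1] := by
  unfold pvS
  rcases h with h | h
  · simp [h]
  · by_cases h0 : n < 0 <;> simp [h0, h]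

-- the Python test 'nuevalista[-1] != -1' in the two shapes
theorem lastD_good (l : List Int) (x : Int) (hx : x = 3 ∨ x = 5) (a b : Nat) :
    (PySem.List.pyGet? (l ++ [x] ++ (List.replicate a 5 ++ List.replicate b 3)) (-1)).getD 0 ≠ -1 := by
  rw [PySem.List.pyGet?_neg_one]
  rcases b with _ | b
  · rcases a with _ | a
    · simp; omega
    · simp [List.replicate_succ', ← List.append_assoc]
  · simp [List.replicate_succ', ← List.append_assoc]

theorem lastD_fail (l : List Int) :
    (PySem.List.pyGet? (l ++ [-1]) (-1)).getD 0 = -1 := by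
  rw [PySem.List.pyGet?_neg_one_append_singleton]; rfl

-- main invariant: A's recursion appends exactly the closed-form suffix (enough fuel given)
theorem pagarGo_eq_suffix (fuel : Nat) (n : Int) (l : List Int) (hf : n ≤ (fuel : Int)) :
    pagarGo (fuel + 1) n l = l ++ pvS n := by
  induction fuel generalizing n l with
  | zero =>
    rw [pagarGo]
    by_cases h0 : n = 0
    · subst h0
      rw [if_pos rfl]
      simp [pvS_good 0 le_rfl (by rw [pvA_zero]), pvA_zero]
    · rw [if_neg h0, if_pos (by omega), pvS_bad n (Or.inl (by omega))]
  | succ fuel ih =>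
    rw [pagarGo]
    by_cases h0 : n = 0
    · subst h0
      rw [if_pos rfl]
      simp [pvS_good 0 le_rfl (by rw [pvA_zero]), pvA_zero]
    by_cases hneg : n < 0
    · rw [if_neg h0, if_pos hneg, pvS_bad n (Or.inl hneg)]
    have hpos : 0 < n := by omega
    rw [if_neg h0, if_neg hneg]
    have ih5 : pagarGo (fuel + 1) (n - 5) (l ++ [5]) = (l ++ [5]) ++ pvS (n - 5) :=
      ih (n - 5) (l ++ [5]) (by omega)
    simp only [ih5]
    by_cases hs5 : 0 ≤ n - 5 ∧ 0 ≤ pvA (n - 5)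
    · obtain ⟨h5, ha⟩ := hs5
      rw [pvS_good (n - 5) h5 ha]
      rw [if_pos (lastD_good l 5 (Or.inr rfl) _ _)]
      have hstep := pvA_step5 n
      have harg : n - 5 * pvA n = n - 5 - 5 * pvA (n - 5) := by omega
      rw [pvS_good n (by omega) (by omega), harg, hstep]
      have : (pvA (n - 5) + 1).toNat = (pvA (n - 5)).toNat + 1 := by omega
      rw [this, List.replicate_succ]
      simp
    · have hfail5 : n - 5 < 0 ∨ pvA (n - 5) < 0 := by omega
      rw [pvS_bad (n - 5) hfail5]
      rw [if_neg (fun hc => hc (lastD_fail (l ++ [5])))]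
      have ih3 : pagarGo (fuel + 1) (n - 3) (l ++ [3]) = (l ++ [3]) ++ pvS (n - 3) :=
        ih (n - 3) (l ++ [3]) (by omega)
      rw [ih3]
      by_cases hs3 : 0 ≤ n - 3 ∧ 0 ≤ pvA (n - 3)
      · obtain ⟨h3, ha⟩ := hs3
        rw [pvS_good (n - 3) h3 ha]
        rw [if_pos (lastD_good l 3 (Or.inl rfl) _ _)]
        obtain ⟨hAn, hA3, hdvd⟩ := pvA_step3 n hfail5 h3 ha
        rw [pvS_good n (by omega) (by omega), hAn, hA3]
        have hb' : ((n - 5 * 0) / 3).toNat = ((n - 3 - 5 * 0) / 3).toNat + 1 := by omega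
        rw [hb']
        simp [List.replicate_succ]
      · have hfail3 : n - 3 < 0 ∨ pvA (n - 3) < 0 := by omega
        rw [pvS_bad (n - 3) hfail3]
        rw [if_neg (fun hc => hc (lastD_fail (l ++ [3])))]
        rw [pvS_bad n (Or.inr (pvA_fail n hpos hfail5 hfail3))]

theorem pagar_eq_suffix (n : Int) (l : List Int) : pagar n l = l ++ pvS n := by
  unfold pagar
  exact pagarGo_eq_suffix n.toNat n l (by omega)

-- ===== VERDICT (by name: the statement is the Claim_ definition above) =====
theorem pagar_spec : Claim_equal_pagar := by
  intro n l _ _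
  unfold Spec_pagar
  rw [pagar_eq_suffix, pagar_alt_eq]
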